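-- pv_equiv track=rewrite | github.com/Kenan3477/Sales-Form | creative_cognition_system.py | _create_mind_map_branches
-- ===== SOURCE A (Python) =====
-- from typing import Dict, List, Any, Tuple, Optional, Set
--
-- def _create_mind_map_branches(central_concept: str, depth: int) -> Dict[str, List[str]]:
--     """Create mind map branches from central concept"""
--     branches = {central_concept: []}
--
--     # Generate branches at each depth level
--     current_level = [central_concept]
--
--     for level in range(depth):
--         next_level = []
--         for concept in current_level:
--             # Generate related concepts
--             related = _generate_related_concepts(concept, 3)
--             branches[concept] = related
--             next_level.extend(related)
--         current_level = next_level
--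
--     return branches
--
-- def _generate_related_concepts(concept: str, count: int) -> List[str]:
--     """Generate related concepts"""
--     # Simple related concept generation
--     concept_associations = {
--         "technology": ["innovation", "automation", "efficiency"],
--         "nature": ["growth", "adaptation", "harmony"],
--         "creativity": ["inspiration", "originality", "expression"],
--         "problem": ["solution", "analysis", "strategy"],
--         "system": ["integration", "optimization", "feedback"]
--     }
--
--     # Find associations or generate generic ones
--     if concept.lower() in concept_associations:
--         return concept_associations[concept.lower()][:count]
--     else:
--         return [f"{concept}_aspect_{i+1}" for i in range(count)]
-- ===== SOURCE B (Python) =====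
-- def _create_mind_map_branches(central_concept: str, depth: int):
--     """Create mind map branches from central concept.
--
--     Two-phase: recursively collect the level-order list of concepts to expand,
--     then build the mapping with a single dict comprehension."""
--     if depth <= 0:
--         return {central_concept: []}
--     return {c: _generate_related_concepts(c, 3)
--             for c in _expand_nodes([central_concept], depth)}
--
--
-- def _expand_nodes(level, d):
--     """Concepts of levels 0..d-1 of the concept tree, in level order."""
--     if d <= 0:
--         return []
--     children = [r for c in level for r in _generate_related_concepts(c, 3)]
--     return level + _expand_nodes(children, d - 1)
--
--
-- def _generate_related_concepts(concept: str, count: int):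
--     """Generate related concepts"""
--     concept_associations = {
--         "technology": ["innovation", "automation", "efficiency"],
--         "nature": ["growth", "adaptation", "harmony"],
--         "creativity": ["inspiration", "originality", "expression"],
--         "problem": ["solution", "analysis", "strategy"],
--         "system": ["integration", "optimization", "feedback"],
--     }
--     if concept.lower() in concept_associations:
--         return concept_associations[concept.lower()][:count]
--     else:
--         return [f"{concept}_aspect_{i+1}" for i in range(count)]
-- ===== Notes on version B (the rewrite author's own statement) =====
-- stated objective: alternative
-- what changed: Replaces A's imperative level-queue loop that mutates the dict while tracking current/next level lists with a two-phase decomposition: a recursive function collects the level-order list of concepts to expand, then a single dict comprehension maps each to its related concepts.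
import Mathlib
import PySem

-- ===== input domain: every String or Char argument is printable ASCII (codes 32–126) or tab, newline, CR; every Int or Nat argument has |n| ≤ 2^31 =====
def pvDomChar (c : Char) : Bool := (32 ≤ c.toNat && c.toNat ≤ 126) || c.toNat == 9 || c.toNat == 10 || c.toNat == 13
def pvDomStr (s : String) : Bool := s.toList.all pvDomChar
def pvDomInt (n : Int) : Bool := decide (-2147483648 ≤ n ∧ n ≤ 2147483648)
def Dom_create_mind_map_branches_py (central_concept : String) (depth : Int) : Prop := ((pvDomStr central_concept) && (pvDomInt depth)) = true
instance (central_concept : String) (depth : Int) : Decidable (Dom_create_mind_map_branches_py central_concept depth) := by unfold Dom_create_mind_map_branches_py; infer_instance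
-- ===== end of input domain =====

-- B replaces A's imperative level-queue loop by a two-phase decomposition (recursively
-- collect the level-order node list, then one dict comprehension); objective: alternative.

-- ===== PORT A =====
-- shared module helper _generate_related_concepts (used verbatim by both Pythons)
def genRelated (concept : String) (count : Int) : List String :=
  let concept_associations : PySem.Dict String (List String) := PySem.Dict.ofList
    [ ("technology", ["innovation", "automation", "efficiency"])
    , ("nature", ["growth", "adaptation", "harmony"])
    , ("creativity", ["inspiration", "originality", "expression"])
    , ("problem", ["solution", "analysis", "strategy"])
    , ("system", ["integration", "optimization", "feedback"]) ]
  match concept_associations.get? (PySem.Str.lower concept) with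
  | some v => PySem.List.slice v none (some count)
  | none => (PySem.List.pyRange 0 count 1).map
      (fun i => concept ++ "_aspect_" ++ PySem.Int.toStr (i + 1))

def create_mind_map_branches_py (central_concept : String) (depth : Int) : List (String × List String) :=
  let branches : PySem.Dict String (List String) := PySem.Dict.ofList [(central_concept, [])]
  let current_level : List String := [central_concept]
  let st := (PySem.List.pyRange 0 depth 1).foldl
    (fun (st : PySem.Dict String (List String) × List String) _ =>
      st.2.foldl
        (fun (st2 : PySem.Dict String (List String) × List String) concept =>
          let related := genRelated concept 3
          (st2.1.insert concept related, st2.2 ++ related))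
        (st.1, ([] : List String)))
    (branches, current_level)
  st.1.items

-- ===== PORT B =====
def expandNodes (level : List String) (d : Int) : List String :=
  if d ≤ 0 then []
  else
    let children := level.flatMap (fun c => genRelated c 3)
    level ++ expandNodes children (d - 1)
termination_by d.toNat
decreasing_by simp_wf; omega

def create_mind_map_branches_py_alt (central_concept : String) (depth : Int) : List (String × List String) :=
  if depth ≤ 0 then (PySem.Dict.ofList [(central_concept, ([] : List String))]).items
  else
    ((expandNodes [central_concept] depth).foldl
      (fun (d : PySem.Dict String (List String)) c => d.insert c (genRelated c 3))
      PySem.Dict.empty).items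

-- ===== PRECONDITION & SPEC =====
def Spec_create_mind_map_branches_py (central_concept : String) (depth : Int) (out : List (String × List String)) : Prop := out = create_mind_map_branches_py_alt central_concept depth
instance (central_concept : String) (depth : Int) (out : List (String × List String)) : Decidable (Spec_create_mind_map_branches_py central_concept depth out) := by unfold Spec_create_mind_map_branches_py; infer_instance

-- ===== CLAIM (what is proved, stated in full; the proofs are below) =====
def Claim_equal_create_mind_map_branches_py : Prop := ∀ (central_concept : String) (depth : Int), Dom_create_mind_map_branches_py central_concept depth → Spec_create_mind_map_branches_py central_concept depth (create_mind_map_branches_py central_concept depth)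

-- ===== LEMMAS AND PROOFS =====

-- A's inner per-level loop over a pair state splits into the dict fold and the flatMap
theorem inner_split (l : List String) (b : PySem.Dict String (List String)) (nx : List String) :
    l.foldl
      (fun (st2 : PySem.Dict String (List String) × List String) concept =>
        let related := genRelated concept 3
        (st2.1.insert concept related, st2.2 ++ related))
      (b, nx)
    = (l.foldl (fun d c => d.insert c (genRelated c 3)) b,
       nx ++ l.flatMap (fun c => genRelated c 3)) := by
  induction l generalizing b nx with
  | nil => simp
  | cons c t ih => simp [List.foldl_cons, ih, List.append_assoc]

-- a fold whose body ignores the list elements is an iterate of its step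
theorem foldl_ignore {σ : Type} (f : σ → σ) : ∀ (l : List Int) (s : σ),
    l.foldl (fun s _ => f s) s = f^[l.length] s := by
  intro l
  induction l with
  | nil => intro s; simp
  | cons x t ih => intro s; simp [List.foldl_cons, ih, Function.iterate_succ_apply]

-- unfolding expandNodes at a positive depth
theorem expandNodes_pos (level : List String) (d : Int) (h : 0 < d) :
    expandNodes level d
      = level ++ expandNodes (level.flatMap (fun c => genRelated c 3)) (d - 1) := by
  rw [expandNodes]
  simp [not_le.mpr h]

theorem expandNodes_nonpos (level : List String) (d : Int) (h : d ≤ 0) :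
    expandNodes level d = [] := by
  rw [expandNodes]; simp [h]

-- A's outer loop, iterated n times, computes B's fold over expandNodes
theorem iterate_step (n : ℕ) (b : PySem.Dict String (List String)) (cur : List String) :
    (fun (st : PySem.Dict String (List String) × List String) =>
        st.2.foldl
          (fun (st2 : PySem.Dict String (List String) × List String) concept =>
            let related := genRelated concept 3
            (st2.1.insert concept related, st2.2 ++ related))
          (st.1, ([] : List String)))^[n] (b, cur)
    = ((expandNodes cur n).foldl (fun d c => d.insert c (genRelated c 3)) b,
       (fun l => l.flatMap (fun c => genRelated c 3))^[n] cur) := by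
  have hf : (fun (st : PySem.Dict String (List String) × List String) =>
        st.2.foldl
          (fun (st2 : PySem.Dict String (List String) × List String) concept =>
            let related := genRelated concept 3
            (st2.1.insert concept related, st2.2 ++ related))
          (st.1, ([] : List String)))
      = (fun (st : PySem.Dict String (List String) × List String) =>
          (st.2.foldl (fun d c => d.insert c (genRelated c 3)) st.1,
           st.2.flatMap (fun c => genRelated c 3))) := by
    funext st
    rw [inner_split]
    simp
  rw [hf]
  induction n generalizing b cur with
  | zero =>
    simp [expandNodes_nonpos cur 0 le_rfl]
  | succ m ih =>
    rw [Function.iterate_succ_apply]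
    show (fun (st : PySem.Dict String (List String) × List String) =>
          (st.2.foldl (fun d c => d.insert c (genRelated c 3)) st.1,
           st.2.flatMap (fun c => genRelated c 3)))^[m]
        (cur.foldl (fun d c => d.insert c (genRelated c 3)) b,
         cur.flatMap (fun c => genRelated c 3)) = _
    rw [ih]
    rw [expandNodes_pos cur ((m + 1 : ℕ) : Int) (by positivity)]
    rw [show (((m + 1 : ℕ) : Int)) - 1 = ((m : ℕ) : Int) by push_cast; ring]
    rw [List.foldl_append, Function.iterate_succ_apply]

-- inserting the key of a one-entry dict overwrites it: same as inserting into empty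
theorem insert_over_singleton (k : String) (v0 v : List String) :
    (PySem.Dict.ofList [(k, v0)]).insert k v = PySem.Dict.empty.insert k v := by
  apply PySem.Dict.ext
  have h0 : PySem.Dict.ofList [(k, v0)] = PySem.Dict.empty.insert k v0 := rfl
  rw [h0, PySem.Dict.insert_insert_self]

-- ===== VERDICT (by name: the statement is the Claim_ definition above) =====
theorem create_mind_map_branches_py_spec : Claim_equal_create_mind_map_branches_py := by
  intro central depth _
  unfold Spec_create_mind_map_branches_py
  unfold create_mind_map_branches_py create_mind_map_branches_py_alt
  by_cases h : depth ≤ 0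
  · rw [PySem.List.pyRange_one_eq_nil (by omega)]
    simp [h]
  · simp only [h, if_false]
    rw [foldl_ignore, PySem.List.length_pyRange_one, iterate_step]
    have hd : (((depth - 0).toNat : ℕ) : Int) = depth := by omega
    rw [hd]
    rw [expandNodes_pos [central] depth (by omega)]
    simp only [List.singleton_append, List.foldl_cons, insert_over_singleton]
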